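-- pv_equiv track=rewrite | github.com/thealper2/codewars-solutions | 7-kyu/interlocking_binary_pairs.py | interlockable
-- ===== SOURCE A (Python) =====
-- def interlockable(a, b):
--     a_binary = []
--     b_binary = []
--
--     while a >= 1 and b >= 1:
--         a_binary.append(a % 2)
--         a //= 2
--
--     while b >= 1:
--         b_binary.append(b % 2)
--         b //= 2
--
--     n = min(len(a_binary), len(b_binary))
--
--     for a_, b_ in zip(a_binary[:n], b_binary[:n]):
--         if a_ == 1 and b_ == 1:
--             return False
--
--     return True
-- ===== SOURCE B (Python) =====
-- def interlockable(a, b):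
--     if a < 1 or b < 1:
--         return True
--     return (a & b) == 0
-- ===== Notes on version B (the rewrite author's own statement) =====
-- stated objective: simpler
-- what changed: Replaced the two bit-list-building loops and the zip/compare loop by a single closed-form bitwise test (a & b) == 0, with the same degenerate guard (a < 1 or b < 1 returns True).
import Mathlib
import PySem

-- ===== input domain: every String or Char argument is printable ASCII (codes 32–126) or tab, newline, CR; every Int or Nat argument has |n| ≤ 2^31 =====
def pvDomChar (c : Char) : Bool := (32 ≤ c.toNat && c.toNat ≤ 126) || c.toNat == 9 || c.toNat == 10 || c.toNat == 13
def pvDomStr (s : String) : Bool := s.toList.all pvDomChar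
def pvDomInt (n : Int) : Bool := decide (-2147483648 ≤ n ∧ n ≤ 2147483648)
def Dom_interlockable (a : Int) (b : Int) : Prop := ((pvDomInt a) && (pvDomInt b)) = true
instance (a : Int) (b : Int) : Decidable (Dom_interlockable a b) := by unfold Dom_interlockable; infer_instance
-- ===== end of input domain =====

-- B replaces A's two bit-list-building loops and the zip/compare loop by the closed-form bitwise test (a & b) == 0, with the same a < 1 / b < 1 guard.

-- ===== PORT A =====
-- first while loop: appends a % 2 and halves a while `a >= 1 and b >= 1` (b is never changed inside it)
def interBitsA (a : Int) (b : Int) : List Int :=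
  if _h : 1 ≤ a ∧ 1 ≤ b then
    PySem.Int.mod a 2 :: interBitsA (PySem.Int.floordiv a 2) b
  else []
termination_by a.toNat
decreasing_by
  simp only [PySem.Int.floordiv_eq_ediv_of_pos (by omega : (0:Int) < 2)]
  omega

-- second while loop: appends b % 2 and halves b while `b >= 1`
def interBitsB (b : Int) : List Int :=
  if _h : 1 ≤ b then
    PySem.Int.mod b 2 :: interBitsB (PySem.Int.floordiv b 2)
  else []
termination_by b.toNat
decreasing_by
  simp only [PySem.Int.floordiv_eq_ediv_of_pos (by omega : (0:Int) < 2)]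
  omega

def interlockable (a : Int) (b : Int) : Bool :=
  let a_binary := interBitsA a b
  let b_binary := interBitsB b
  let n : Nat := min a_binary.length b_binary.length
  -- `for a_, b_ in zip(a_binary[:n], b_binary[:n]): if a_ == 1 and b_ == 1: return False`, then `return True`
  if ((PySem.List.slice a_binary none (some (n : Int))).zip
      (PySem.List.slice b_binary none (some (n : Int)))).any
       (fun p => p.1 == 1 && p.2 == 1) then false else true

-- ===== PORT B =====
def interlockable_alt (a : Int) (b : Int) : Bool :=
  if a < 1 || b < 1 then true else PySem.Int.band a b == 0

-- ===== PRECONDITION & SPEC =====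
def Spec_interlockable (a : Int) (b : Int) (out : Bool) : Prop := out = interlockable_alt a b
instance (a : Int) (b : Int) (out : Bool) : Decidable (Spec_interlockable a b out) := by unfold Spec_interlockable; infer_instance

-- ===== CLAIM (what is proved, stated in full; the proofs are below) =====
def Claim_equal_interlockable : Prop := ∀ (a : Int) (b : Int), Dom_interlockable a b → Spec_interlockable a b (interlockable a b)

-- ===== LEMMAS AND PROOFS =====

-- the first loop's guard on b is constant, so for b ≥ 1 it computes exactly the bits of a
theorem interBitsA_eq (a b : Int) (hb : 1 ≤ b) : interBitsA a b = interBitsB a := by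
  rw [interBitsA, interBitsB]
  by_cases ha : 1 ≤ a
  · simp only [ha, hb, and_self, dite_true]
    rw [interBitsA_eq (PySem.Int.floordiv a 2) b hb]
  · simp [ha]
termination_by a.toNat
decreasing_by
  simp only [PySem.Int.floordiv_eq_ediv_of_pos (by omega : (0:Int) < 2)]
  omega

theorem interBitsB_natCast (m : Nat) (hm : 0 < m) :
    interBitsB (m : Int) = ((m % 2 : Nat) : Int) :: interBitsB ((m / 2 : Nat) : Int) := by
  rw [interBitsB]
  simp [show (1:Int) ≤ (m:Int) by exact_mod_cast hm]

-- core: A's "some low bit set in both" scan equals the bitwise AND test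
theorem zip_any_eq_and (m n : Nat) :
    ((interBitsB (m : Int)).zip (interBitsB (n : Int))).any
      (fun p => p.1 == 1 && p.2 == 1) = !(decide (m &&& n = 0)) := by
  induction m using Nat.strong_induction_on generalizing n with
  | _ m ih =>
    by_cases hm : 0 < m
    · by_cases hn : 0 < n
      · rw [interBitsB_natCast m hm, interBitsB_natCast n hn]
        rw [List.zip_cons_cons, List.any_cons]
        rw [ih (m / 2) (by omega) (n / 2)]
        have h1 : (m &&& n) % 2 = 1 ↔ m % 2 = 1 ∧ n % 2 = 1 := Nat.and_mod_two_eq_one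
        have h2 : (m &&& n) / 2 = m / 2 &&& n / 2 := Nat.and_div_two
        rcases Nat.mod_two_eq_zero_or_one m with hm2 | hm2 <;>
          rcases Nat.mod_two_eq_zero_or_one n with hn2 | hn2 <;>
          simp only [hm2, hn2] <;>
          by_cases hz : m / 2 &&& n / 2 = 0 <;>
          simp [hz] <;> omega
      · have hn0 : n = 0 := by omega
        subst hn0
        have h0 : interBitsB ((0:Nat) : Int) = [] := by rw [interBitsB]; simp
        rw [h0]
        simp
    · have hm0 : m = 0 := by omega
      subst hm0
      have h0 : interBitsB ((0:Nat) : Int) = [] := by rw [interBitsB]; simp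
      rw [h0]
      simp
-- the truncation to n = min(len, len) keeps both lists whole under zip
theorem take_zip_min {α β : Type} (xs : List α) (ys : List β) :
    ((xs.take (min xs.length ys.length)).zip (ys.take (min xs.length ys.length))) = xs.zip ys := by
  rw [List.zip_eq_zipWith, List.zip_eq_zipWith, ← List.take_zipWith]
  exact List.take_of_length_le (by simp)

-- ===== VERDICT (by name: the statement is the Claim_ definition above) =====
theorem interlockable_spec : Claim_equal_interlockable := by
  intro a b _
  unfold Spec_interlockable interlockable interlockable_alt
  by_cases h : 1 ≤ a ∧ 1 ≤ b
  · obtain ⟨ha, hb⟩ := h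
    rw [interBitsA_eq a b hb]
    obtain ⟨m, rfl⟩ := Int.eq_ofNat_of_zero_le (by omega : 0 ≤ a)
    obtain ⟨n, rfl⟩ := Int.eq_ofNat_of_zero_le (by omega : 0 ≤ b)
    simp only [PySem.List.slice_to_natCast]
    rw [take_zip_min, zip_any_eq_and m n]
    have hband := PySem.Int.band_natCast m n
    have hcond : (decide ((m:Int) < 1) || decide ((n:Int) < 1)) = false := by
      simp only [Bool.or_eq_false_iff, decide_eq_false_iff_not, not_lt]
      exact ⟨ha, hb⟩
    rw [hcond, hband]
    simp only [Bool.false_eq_true, if_false]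
    by_cases hz : m &&& n = 0
    · simp [hz]
    · simp [hz]
  · rw [interBitsA, dif_neg h]
    have hcond : (decide (a < 1) || decide (b < 1)) = true := by
      simp only [Bool.or_eq_true, decide_eq_true_eq]
      omega
    rw [hcond, if_pos rfl]
    simp [PySem.List.slice]
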